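-- pv_equiv track=rewrite | github.com/t0r1n88/Lachesis | mental_state/dopok_leon_osin.py | calc_value_po
-- ===== SOURCE A (Python) =====
-- def calc_value_po(row):
--     """
--     Функция для подсчета значения
--     :return: число
--     """
--     lst_pr = [3,7,9,12,15,17,19,22,24]
--     lst_neg = []
--     value_forward = 0  # результат
--     for idx, value in enumerate(row,1):
--         if idx in lst_pr:
--             if idx not in lst_neg:
--                 value_forward += value
--             else:
--                 if value == 1:
--                     value_forward += 4
--                 elif value == 2:
--                     value_forward += 3
--                 elif value == 3:
--                     value_forward += 2
--                 else:
--                     value_forward += 1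
--
--
--     return value_forward
-- ===== SOURCE B (Python) =====
-- def calc_value_po(row):
--     """
--     Функция для подсчета значения
--     :return: число
--     """
--     lst_pr = [3, 7, 9, 12, 15, 17, 19, 22, 24]
--     return sum(row[p - 1] for p in lst_pr if p <= len(row))
-- ===== Notes on version B (the rewrite author's own statement) =====
-- stated objective: faster
-- what changed: B iterates directly over the nine fixed positions and sums row[p-1] for those within the row (O(1) in the row length), instead of enumerating the whole row and testing each index for membership; the dead lst_neg branch is dropped.
import Mathlib
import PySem

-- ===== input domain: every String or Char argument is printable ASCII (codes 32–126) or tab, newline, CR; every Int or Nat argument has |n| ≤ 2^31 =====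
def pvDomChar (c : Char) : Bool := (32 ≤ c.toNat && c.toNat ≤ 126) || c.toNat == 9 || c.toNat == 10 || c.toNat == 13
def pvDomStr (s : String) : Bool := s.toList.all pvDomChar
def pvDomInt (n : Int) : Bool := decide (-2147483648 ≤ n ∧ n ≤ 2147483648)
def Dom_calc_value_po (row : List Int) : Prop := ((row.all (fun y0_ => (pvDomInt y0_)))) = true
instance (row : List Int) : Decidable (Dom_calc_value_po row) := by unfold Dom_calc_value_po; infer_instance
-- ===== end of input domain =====

-- B sums row[p-1] directly over the nine fixed positions (skipping positions past the
-- end of the row) instead of enumerating the whole row and testing index membership;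
-- objective: idiomatic/simpler (A's dead lst_neg branch is dropped).

-- ===== PORT A =====
-- loop body of A's 'for idx, value in enumerate(row, 1)'
def stepA (value_forward : Int) (iv : Int × Int) : Int :=
  let idx := iv.1
  let value := iv.2
  let lst_pr : List Int := [3, 7, 9, 12, 15, 17, 19, 22, 24]
  let lst_neg : List Int := []
  if idx ∈ lst_pr then
    if idx ∉ lst_neg then value_forward + value
    else if value == 1 then value_forward + 4
    else if value == 2 then value_forward + 3
    else if value == 3 then value_forward + 2
    else value_forward + 1
  else value_forward

def calc_value_po (row : List Int) : Int :=
  (PySem.List.enumerate row 1).foldl stepA 0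

-- ===== PORT B =====
def calc_value_po_alt (row : List Int) : Int :=
  let lst_pr : List Int := [3, 7, 9, 12, 15, 17, 19, 22, 24]
  -- sum(row[p - 1] for p in lst_pr if p <= len(row)); the guard makes row[p-1] in range,
  -- so '.getD 0' (the ported row[p-1]) never takes its default
  lst_pr.foldl
    (fun s p => if p ≤ (row.length : Int) then s + (PySem.List.pyGet? row (p - 1)).getD 0 else s) 0

-- ===== PRECONDITION & SPEC =====
def Spec_calc_value_po (row : List Int) (out : Int) : Prop := out = calc_value_po_alt row
instance (row : List Int) (out : Int) : Decidable (Spec_calc_value_po row out) := by unfold Spec_calc_value_po; infer_instance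

-- ===== CLAIM (what is proved, stated in full; the proofs are below) =====
def Claim_equal_calc_value_po : Prop := ∀ (row : List Int), Dom_calc_value_po row → Spec_calc_value_po row (calc_value_po row)

-- ===== LEMMAS AND PROOFS =====

-- value at a 0-based position, 0 when out of range
def valAt : List Int → Nat → Int
  | [], _ => 0
  | v :: _, 0 => v
  | _ :: t, n + 1 => valAt t n

-- contribution of fixed 1-based position p to the tail of the row starting at index k
def T (p k : Int) (row : List Int) : Int :=
  if k ≤ p then valAt row (p - k).toNat else 0

-- sum of the nine position contributions
def SB (k : Int) (row : List Int) : Int :=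
  T 3 k row + T 7 k row + T 9 k row + T 12 k row + T 15 k row +
    T 17 k row + T 19 k row + T 22 k row + T 24 k row

-- A's loop tail, abstracted over the running 1-based index k
def F (k : Int) : List Int → Int
  | [] => 0
  | v :: t => (if k ∈ ([3, 7, 9, 12, 15, 17, 19, 22, 24] : List Int) then v else 0) + F (k + 1) t

theorem valAt_eq (row : List Int) : ∀ (n : Nat), valAt row n = (row[n]?).getD 0 := by
  induction row with
  | nil => intro n; simp [valAt]
  | cons v t ih => intro n; cases n with
    | zero => simp [valAt]
    | succ m => simp [valAt, ih]

theorem T_step (p k v : Int) (t : List Int) :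
    T p k (v :: t) = (if p = k then v else 0) + T p (k + 1) t := by
  unfold T
  by_cases h1 : p = k
  · subst h1
    have h2 : ¬ (p + 1 ≤ p) := by omega
    simp [h2, valAt]
  · by_cases h2 : k ≤ p
    · have h3 : k + 1 ≤ p := by omega
      have h4 : (p - k).toNat = (p - (k + 1)).toNat + 1 := by omega
      simp [h1, h2, h3, h4, valAt]
    · have h3 : ¬ (k + 1 ≤ p) := by omega
      simp [h1, h2, h3]

theorem F_eq_SB (row : List Int) : ∀ (k : Int), F k row = SB k row := by
  induction row with
  | nil => intro k; simp [F, SB, T, valAt]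
  | cons v t ih =>
    intro k
    have hmem : (if k ∈ ([3, 7, 9, 12, 15, 17, 19, 22, 24] : List Int) then v else 0) =
        (if (3 : Int) = k then v else 0) + (if (7 : Int) = k then v else 0) +
        (if (9 : Int) = k then v else 0) + (if (12 : Int) = k then v else 0) +
        (if (15 : Int) = k then v else 0) + (if (17 : Int) = k then v else 0) +
        (if (19 : Int) = k then v else 0) + (if (22 : Int) = k then v else 0) +
        (if (24 : Int) = k then v else 0) := by
      simp only [List.mem_cons, List.not_mem_nil, or_false]
      split_ifs <;> omega
    show (if k ∈ ([3, 7, 9, 12, 15, 17, 19, 22, 24] : List Int) then v else 0) + F (k + 1) t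
        = SB k (v :: t)
    rw [hmem, ih (k + 1)]
    simp only [SB, T_step]
    ring

theorem loopA (l : List Int) : ∀ (k acc : Int),
    (PySem.List.enumerate l k).foldl stepA acc = acc + F k l := by
  induction l with
  | nil => intro k acc; simp [PySem.List.enumerate_nil, F]
  | cons v t ih =>
    intro k acc
    rw [PySem.List.enumerate_cons, List.foldl_cons, ih]
    by_cases h : k ∈ ([3, 7, 9, 12, 15, 17, 19, 22, 24] : List Int) <;>
      simp [stepA, F, h] <;> try ring

theorem B_term (row : List Int) (p : Int) (hp : 1 ≤ p) :
    (if p ≤ (row.length : Int) then (PySem.List.pyGet? row (p - 1)).getD 0 else 0) = T p 1 row := by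
  unfold T
  have h1 : (1 : Int) ≤ p := hp
  have hc : p - 1 = (((p - 1).toNat : Nat) : Int) := by omega
  by_cases h : p ≤ (row.length : Int)
  · rw [if_pos h, if_pos h1, hc, PySem.List.pyGet?_natCast, valAt_eq]
    simp
  · rw [if_neg h, if_pos h1, valAt_eq]
    have hge : row.length ≤ (p - 1).toNat := by omega
    rw [List.getElem?_eq_none hge]
    rfl

theorem loopB (row : List Int) : ∀ (L : List Int) (acc : Int),
    L.foldl (fun s p => if p ≤ (row.length : Int) then s + (PySem.List.pyGet? row (p - 1)).getD 0 else s) acc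
      = acc + (L.map (fun p => if p ≤ (row.length : Int) then (PySem.List.pyGet? row (p - 1)).getD 0 else 0)).sum := by
  intro L
  induction L with
  | nil => intro acc; simp
  | cons p t ih =>
    intro acc
    rw [List.foldl_cons, ih, List.map_cons, List.sum_cons]
    by_cases h : p ≤ (row.length : Int) <;> simp [h] <;> try ring

-- ===== VERDICT (by name: the statement is the Claim_ definition above) =====
theorem calc_value_po_spec : Claim_equal_calc_value_po := by
  intro row _
  show calc_value_po row = calc_value_po_alt row
  have hA : calc_value_po row = SB 1 row := by
    rw [calc_value_po, loopA, F_eq_SB]; ring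
  have hB : calc_value_po_alt row = SB 1 row := by
    simp only [calc_value_po_alt]
    rw [loopB, List.map_cons, List.map_cons, List.map_cons, List.map_cons, List.map_cons,
      List.map_cons, List.map_cons, List.map_cons, List.map_cons, List.map_nil,
      List.sum_cons, List.sum_cons, List.sum_cons, List.sum_cons, List.sum_cons,
      List.sum_cons, List.sum_cons, List.sum_cons, List.sum_cons, List.sum_nil,
      B_term row 3 (by norm_num), B_term row 7 (by norm_num), B_term row 9 (by norm_num),
      B_term row 12 (by norm_num), B_term row 15 (by norm_num), B_term row 17 (by norm_num),
      B_term row 19 (by norm_num), B_term row 22 (by norm_num), B_term row 24 (by norm_num)]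
    unfold SB
    ring
  rw [hA, hB]
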